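-- pv_equiv track=rewrite | github.com/1HectorAC/ShowTracker | user/models.py | sortByTimeHelper
-- ===== SOURCE A (Python) =====
-- def sortByTimeHelper(l):
--     singleDigitHours = []
--     doubleDigitHours = []
--     hour12 = []
--     for x in l:
--         # Filter 12th hour
--         if(x['time'][:2] == '12'):
--             hour12.append(x)
--         # Filter single digit hour
--         elif(len(x['time']) == 7):
--             singleDigitHours.append(x)
--         # Filter double digit hour
--         else:
--             doubleDigitHours.append(x)
--     return hour12 + singleDigitHours + doubleDigitHours
-- ===== SOURCE B (Python) =====
-- def sortByTimeHelper(l):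
--     def bucket(x):
--         t = x['time']
--         return 0 if t[:2] == '12' else (1 if len(t) == 7 else 2)
--     return sorted(l, key=bucket)
-- ===== Notes on version B (the rewrite author's own statement) =====
-- stated objective: idiomatic
-- what changed: Replaces the three manual bucket lists and their concatenation with a single stable sorted() call keyed by a 3-valued bucket function, relying on sort stability for within-bucket order.
import Mathlib
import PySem

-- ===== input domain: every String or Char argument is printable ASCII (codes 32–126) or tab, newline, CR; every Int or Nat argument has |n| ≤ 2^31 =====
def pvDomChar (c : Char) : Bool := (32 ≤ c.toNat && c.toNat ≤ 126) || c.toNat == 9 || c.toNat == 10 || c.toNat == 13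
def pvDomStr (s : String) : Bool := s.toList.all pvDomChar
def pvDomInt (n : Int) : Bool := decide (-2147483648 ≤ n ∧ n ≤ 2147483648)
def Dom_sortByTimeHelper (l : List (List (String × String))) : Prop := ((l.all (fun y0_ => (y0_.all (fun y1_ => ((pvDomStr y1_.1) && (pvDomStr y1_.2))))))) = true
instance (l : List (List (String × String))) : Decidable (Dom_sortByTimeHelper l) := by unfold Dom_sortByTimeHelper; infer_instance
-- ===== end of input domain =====

-- B replaces A's three manual bucket lists with one stable sort keyed by a 3-valued bucket function (idiomatic; same results).

-- ===== PORT A =====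
-- A: one pass appending each item to one of three lists, then hour12 ++ single ++ double.
def sortByTimeHelper (l : List (List (String × String))) : List (List (String × String)) :=
  let step := fun (acc : List (List (String × String)) × List (List (String × String)) × List (List (String × String))) (x : List (String × String)) =>
    let t := ((x.find? (fun p => p.1 == "time")).map Prod.snd).getD ""   -- x['time'] (first match; Pre_ guarantees presence)
    if PySem.Str.slice t none (some 2) = "12" then (acc.1, acc.2.1, acc.2.2 ++ [x])
    else if PySem.Str.len t = 7 then (acc.1 ++ [x], acc.2.1, acc.2.2)
    else (acc.1, acc.2.1 ++ [x], acc.2.2)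
  let r := l.foldl step ([], [], [])   -- (singleDigitHours, doubleDigitHours, hour12)
  r.2.2 ++ r.1 ++ r.2.1

-- ===== PORT B =====
-- B's key function: 0 for '12'-prefixed times, 1 for 7-char times, else 2.
def timeBucket (x : List (String × String)) : Nat :=
  let t := ((x.find? (fun p => p.1 == "time")).map Prod.snd).getD ""   -- x['time']
  if PySem.Str.slice t none (some 2) = "12" then 0
  else if PySem.Str.len t = 7 then 1 else 2

def sortByTimeHelper_alt (l : List (List (String × String))) : List (List (String × String)) :=
  PySem.List.sorted l timeBucket

-- ===== PRECONDITION & SPEC =====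
-- Pre_ excludes exactly the inputs where some item lacks a 'time' key, on which Python A raises KeyError.
def Pre_sortByTimeHelper (l : List (List (String × String))) : Prop :=
  (l.all (fun x => (x.find? (fun p => p.1 == "time")).isSome)) = true
instance (l : List (List (String × String))) : Decidable (Pre_sortByTimeHelper l) := by unfold Pre_sortByTimeHelper; infer_instance
def pvWitness_sortByTimeHelper : (List (List (String × String))) := [[("time", "7:00 AM")], [("time", "12:30 PM")]]

def Spec_sortByTimeHelper (l : List (List (String × String))) (out : List (List (String × String))) : Prop := out = sortByTimeHelper_alt l
instance (l : List (List (String × String))) (out : List (List (String × String))) : Decidable (Spec_sortByTimeHelper l out) := by unfold Spec_sortByTimeHelper; infer_instance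

-- ===== CLAIM (what is proved, stated in full; the proofs are below) =====
def Claim_equal_sortByTimeHelper : Prop := ∀ (l : List (List (String × String))), Dom_sortByTimeHelper l → Pre_sortByTimeHelper l → Spec_sortByTimeHelper l (sortByTimeHelper l)

-- ===== LEMMAS AND PROOFS =====

theorem insertBy_append_not {α : Type} (before : α → α → Bool) (x : α) (ys zs : List α)
    (h : ∀ y ∈ ys, before x y = false) :
    PySem.List.insertBy before x (ys ++ zs) = ys ++ PySem.List.insertBy before x zs := by
  induction ys with
  | nil => rfl
  | cons a t ih =>
    simp only [List.cons_append, PySem.List.insertBy, h a (by simp)]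
    simp [ih (fun y hy => h y (by simp [hy]))]

theorem insertBy_all_before {α : Type} (before : α → α → Bool) (x : α) (zs : List α)
    (h : ∀ z ∈ zs, before x z = true) :
    PySem.List.insertBy before x zs = x :: zs := by
  cases zs with
  | nil => rfl
  | cons a t => simp [PySem.List.insertBy, h a (by simp)]

theorem foldl_insertBy_buckets {α : Type} (k : α → Nat) (hk : ∀ x, k x ≤ 2) (l : List α) :
    List.foldl (fun acc x => PySem.List.insertBy (fun a b => decide (k a < k b)) x acc) [] l
    = l.filter (fun x => k x == 0) ++ l.filter (fun x => k x == 1) ++ l.filter (fun x => k x == 2) := by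
  induction l using List.reverseRecOn with
  | nil => rfl
  | append_singleton l x ih =>
    rw [List.foldl_append, List.foldl_cons, List.foldl_nil, ih]
    have h0 : ∀ y ∈ l.filter (fun x => k x == 0), k y = 0 := by
      intro y hy; simpa using (List.mem_filter.mp hy).2
    have h1 : ∀ y ∈ l.filter (fun x => k x == 1), k y = 1 := by
      intro y hy; simpa using (List.mem_filter.mp hy).2
    have h2 : ∀ y ∈ l.filter (fun x => k x == 2), k y = 2 := by
      intro y hy; simpa using (List.mem_filter.mp hy).2
    have hkx := hk x
    interval_cases h : (k x)
    · -- k x = 0 : insert after bucket 0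
      rw [List.append_assoc, insertBy_append_not _ _ _ _
          (fun y hy => by simp [h, h0 y hy]),
        insertBy_all_before _ _ _ (fun z hz => by
          rcases List.mem_append.mp hz with hz | hz
          · simp [h, h1 z hz]
          · simp [h, h2 z hz])]
      simp [List.filter_append, h, List.append_assoc]
    · -- k x = 1 : insert between buckets 1 and 2
      rw [insertBy_append_not _ _ _ _ (fun y hy => by
          rcases List.mem_append.mp hy with hy | hy
          · simp [h, h0 y hy]
          · simp [h, h1 y hy]),
        insertBy_all_before _ _ _ (fun z hz => by simp [h, h2 z hz])]
      simp [List.filter_append, h, List.append_assoc]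
    · -- k x = 2 : append at the very end
      rw [PySem.List.insertBy_of_forall_not_before _ _ _ (fun y hy => by
          rcases List.mem_append.mp hy with hy | hy
          · rcases List.mem_append.mp hy with hy | hy
            · simp [h, h0 y hy]
            · simp [h, h1 y hy]
          · simp [h, h2 y hy])]
      simp [List.filter_append, h, List.append_assoc]

theorem foldlA_buckets (l : List (List (String × String)))
    (s d h : List (List (String × String))) :
    List.foldl (fun (acc : List (List (String × String)) × List (List (String × String)) × List (List (String × String))) x =>
      let t := ((x.find? (fun p => p.1 == "time")).map Prod.snd).getD ""
      if PySem.Str.slice t none (some 2) = "12" then (acc.1, acc.2.1, acc.2.2 ++ [x])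
      else if PySem.Str.len t = 7 then (acc.1 ++ [x], acc.2.1, acc.2.2)
      else (acc.1, acc.2.1 ++ [x], acc.2.2)) (s, d, h) l
    = (s ++ l.filter (fun x => timeBucket x == 1),
       d ++ l.filter (fun x => timeBucket x == 2),
       h ++ l.filter (fun x => timeBucket x == 0)) := by
  induction l generalizing s d h with
  | nil => simp
  | cons x xs ih =>
    by_cases h12 : PySem.Str.slice (((x.find? (fun p => p.1 == "time")).map Prod.snd).getD "") none (some 2) = "12"
    · simp only [List.foldl_cons, h12, if_pos]
      rw [ih]
      simp [timeBucket, List.filter_cons, h12]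
    · by_cases h7 : PySem.Str.len (((x.find? (fun p => p.1 == "time")).map Prod.snd).getD "") = 7
      · simp only [List.foldl_cons, h12, h7, if_neg, if_pos]
        rw [ih]
        simp only [PySem.Str.len_eq, String.length_toList] at h7
        simp [timeBucket, List.filter_cons, h12, h7]
      · simp only [List.foldl_cons, h12, h7, if_neg]
        rw [ih]
        simp only [PySem.Str.len_eq, String.length_toList] at h7
        simp [timeBucket, List.filter_cons, h12, h7]

theorem timeBucket_le (x : List (String × String)) : timeBucket x ≤ 2 := by
  unfold timeBucket
  dsimp only
  split_ifs <;> omega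

-- ===== VERDICT (by name: the statement is the Claim_ definition above) =====
theorem sortByTimeHelper_spec : Claim_equal_sortByTimeHelper := by
  intro l _ _
  unfold Spec_sortByTimeHelper sortByTimeHelper sortByTimeHelper_alt
  rw [PySem.List.sorted_eq_foldl_insertBy, foldl_insertBy_buckets timeBucket timeBucket_le]
  simp only [foldlA_buckets l [] [] []]
  simp [List.append_assoc]
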